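-- pv_equiv track=rewrite | github.com/xavier-egoneau/Maurice | maurice/kernel/system_prompt.py | _user_profile_missing_basics
-- ===== SOURCE A (Python) =====
-- def _user_profile_missing_basics(text: str) -> list[str]:
--     values = _user_profile_values(text)
--     missing = []
--     expected_fields = [
--         ("name or preferred address", ("name or preferred address", "name", "preferred address")),
--         ("main language", ("main language", "language")),
--         ("tone preferences", ("tone preferences", "tone")),
--         ("relationship style", ("relationship style",)),
--         ("helpful defaults", ("helpful defaults",)),
--         ("things to avoid", ("things to avoid",)),
--         ("boundaries", ("boundaries",)),
--     ]
--     for label, aliases in expected_fields: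
--         if not any(key == alias or key.startswith(alias + " ") for key in values for alias in aliases):
--             missing.append(label)
--     return missing
--
-- def _user_profile_values(text: str) -> dict[str, str]:
--     values: dict[str, str] = {}
--     for raw_line in text.splitlines():
--         line = raw_line.strip()
--         if not line or line.startswith("#") or line.startswith("_"):
--             continue
--         if not line.startswith("- "):
--             continue
--         item = line[2:].strip()
--         if not item or item == "-":
--             continue
--         if ":" not in item:
--             values[item.lower()] = item
--             continue
--         key, value = item.split(":", 1)
--         if value.strip():
--             values[key.strip().lower()] = value.strip()
--     return values
-- ===== SOURCE B (Python) =====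
-- def _user_profile_missing_basics(text: str) -> list[str]:
--     # Flat (alias, label) map instead of per-label alias tuples; no dict is built:
--     # only key membership matters, so we stream normalized keys straight off the lines.
--     labels = [
--         "name or preferred address",
--         "main language",
--         "tone preferences",
--         "relationship style",
--         "helpful defaults",
--         "things to avoid",
--         "boundaries",
--     ]
--     alias_map = [
--         ("name or preferred address", "name or preferred address"),
--         ("name", "name or preferred address"),
--         ("preferred address", "name or preferred address"),
--         ("main language", "main language"),
--         ("language", "main language"),
--         ("tone preferences", "tone preferences"),
--         ("tone", "tone preferences"),
--         ("relationship style", "relationship style"),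
--         ("helpful defaults", "helpful defaults"),
--         ("things to avoid", "things to avoid"),
--         ("boundaries", "boundaries"),
--     ]
--     present = set()
--     for raw_line in text.splitlines():
--         line = raw_line.strip()
--         if not line.startswith("- "):
--             continue
--         item = line[2:].strip()
--         if not item or item == "-":
--             continue
--         if ":" in item:
--             key, value = item.split(":", 1)
--             if not value.strip():
--                 continue
--             key = key.strip().lower()
--         else:
--             key = item.lower()
--         for alias, label in alias_map:
--             if key == alias or key.startswith(alias + " "):
--                 present.add(label)
--     return [label for label in labels if label not in present]
-- ===== Notes on version B (the rewrite author's own statement) =====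
-- stated objective: alternative
-- what changed: B never builds the key->value dict: it streams normalized keys straight off the lines, marks present labels through a flat (alias, label) lookup table while scanning, and finally lists the labels never marked, instead of A's per-field rescan of a parsed dict.
import Mathlib
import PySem

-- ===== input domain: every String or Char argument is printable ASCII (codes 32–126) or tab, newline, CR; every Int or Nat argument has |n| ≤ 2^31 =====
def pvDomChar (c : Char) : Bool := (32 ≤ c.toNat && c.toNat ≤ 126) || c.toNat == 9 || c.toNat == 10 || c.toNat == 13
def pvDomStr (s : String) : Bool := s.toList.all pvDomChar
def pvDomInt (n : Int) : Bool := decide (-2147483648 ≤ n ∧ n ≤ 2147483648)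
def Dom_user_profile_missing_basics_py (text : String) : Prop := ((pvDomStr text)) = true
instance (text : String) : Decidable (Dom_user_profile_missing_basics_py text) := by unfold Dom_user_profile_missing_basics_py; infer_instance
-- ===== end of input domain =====

-- B drops the dict entirely (only key membership is ever used): it streams normalized
-- keys straight off the lines, marks present labels through a flat (alias, label) map,
-- and lists the labels never marked (objective: alternative decomposition).

-- ===== PORT A =====
-- A's helper _user_profile_values; the loop body is named so the lemmas can speak about one step
def pvValuesStep (values : PySem.Dict String String) (raw_line : String) : PySem.Dict String String :=
  let line := PySem.Str.strip raw_line
  if line == "" || PySem.Str.startswith line "#" || PySem.Str.startswith line "_" then values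
  else if !(PySem.Str.startswith line "- ") then values
  else
    let item := PySem.Str.strip (PySem.Str.slice line (some 2) none)
    if item == "" || item == "-" then values
    else if !(PySem.Str.isIn ":" item) then values.insert (PySem.Str.lower item) item
    else
      -- item.split(":", 1): ":" ≠ "" so splitMax? is some; ":" ∈ item so it has 2 parts
      match PySem.Str.splitMax? item ":" 1 with
      | some (key :: value :: _) =>
          if PySem.Str.strip value == "" then values
          else values.insert (PySem.Str.lower (PySem.Str.strip key)) (PySem.Str.strip value)
      | _ => values

def pvValues (text : String) : PySem.Dict String String :=
  (PySem.Str.splitlines text).foldl pvValuesStep PySem.Dict.empty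

-- the expected_fields literal of A
def pvFields : List (String × List String) :=
  [("name or preferred address", ["name or preferred address", "name", "preferred address"]),
   ("main language", ["main language", "language"]),
   ("tone preferences", ["tone preferences", "tone"]),
   ("relationship style", ["relationship style"]),
   ("helpful defaults", ["helpful defaults"]),
   ("things to avoid", ["things to avoid"]),
   ("boundaries", ["boundaries"])]

def user_profile_missing_basics_py (text : String) : List String :=
  let values := pvValues text
  pvFields.foldl (fun missing la =>
    if !(values.keys.any (fun key => la.2.any (fun al =>
          key == al || PySem.Str.startswith key (al ++ " "))))
    then missing ++ [la.1] else missing) []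

-- ===== PORT B =====
def pvLabels : List String :=
  ["name or preferred address", "main language", "tone preferences",
   "relationship style", "helpful defaults", "things to avoid", "boundaries"]

def pvAliasPairs : List (String × String) :=
  [("name or preferred address", "name or preferred address"),
   ("name", "name or preferred address"),
   ("preferred address", "name or preferred address"),
   ("main language", "main language"),
   ("language", "main language"),
   ("tone preferences", "tone preferences"),
   ("tone", "tone preferences"),
   ("relationship style", "relationship style"),
   ("helpful defaults", "helpful defaults"),
   ("things to avoid", "things to avoid"),
   ("boundaries", "boundaries")]

-- the key (if any) B's loop body extracts from one raw line (the 'continue's become [])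
def pvKeyOfLine (raw_line : String) : List String :=
  let line := PySem.Str.strip raw_line
  if !(PySem.Str.startswith line "- ") then []
  else
    let item := PySem.Str.strip (PySem.Str.slice line (some 2) none)
    if item == "" || item == "-" then []
    else if PySem.Str.isIn ":" item then
      match PySem.Str.splitMax? item ":" 1 with
      | some (key :: value :: _) =>
          if PySem.Str.strip value == "" then []
          else [PySem.Str.lower (PySem.Str.strip key)]
      | _ => []
    else [PySem.Str.lower item]

def user_profile_missing_basics_py_alt (text : String) : List String :=
  let present : PySem.Set String :=
    (PySem.Str.splitlines text).foldl (fun pres raw_line =>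
      (pvKeyOfLine raw_line).foldl (fun pres key =>
        pvAliasPairs.foldl (fun pres p =>
          if key == p.1 || PySem.Str.startswith key (p.1 ++ " ")
          then PySem.Set.add pres p.2 else pres) pres) pres) PySem.Set.empty
  pvLabels.filter (fun label => !(PySem.Set.contains present label))

-- ===== PRECONDITION & SPEC =====
def Spec_user_profile_missing_basics_py (text : String) (out : List String) : Prop := out = user_profile_missing_basics_py_alt text
instance (text : String) (out : List String) : Decidable (Spec_user_profile_missing_basics_py text out) := by unfold Spec_user_profile_missing_basics_py; infer_instance

-- ===== CLAIM (what is proved, stated in full; the proofs are below) =====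
def Claim_equal_user_profile_missing_basics_py : Prop := ∀ (text : String), Dom_user_profile_missing_basics_py text → Spec_user_profile_missing_basics_py text (user_profile_missing_basics_py text)

-- ===== LEMMAS AND PROOFS =====

-- a line A skips as a comment/blank cannot start with "- "
lemma not_dash_of_skip (line : String)
    (h : (line == "" || PySem.Str.startswith line "#" || PySem.Str.startswith line "_") = true) :
    PySem.Str.startswith line "- " = false := by
  rw [← Bool.not_eq_true, PySem.Str.startswith_eq, PySem.Chars.startswith_iff]
  intro hp
  obtain ⟨t2, h2⟩ := hp
  simp only [Bool.or_eq_true, beq_iff_eq, PySem.Str.startswith_eq, PySem.Chars.startswith_iff] at h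
  rcases h with (h | ⟨t1, h1⟩) | ⟨t1, h1⟩
  · rw [h] at h2; simp at h2
  · rw [← h1] at h2; simp at h2
  · rw [← h1] at h2; simp at h2

-- one A-step inserts exactly the key B extracts from that line (as far as keys go)
lemma keys_step (raw : String) (d : PySem.Dict String String) (k : String) :
    k ∈ (pvValuesStep d raw).keys ↔ k ∈ d.keys ∨ k ∈ pvKeyOfLine raw := by
  unfold pvValuesStep pvKeyOfLine
  rcases hsp : PySem.Str.splitMax? (PySem.Str.strip (PySem.Str.slice (PySem.Str.strip raw) (some 2) none)) ":" 1
    with _ | ⟨_ | ⟨key, _ | ⟨value, rest⟩⟩⟩ <;>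
    simp only [hsp] <;>
    split_ifs with h1 h2 h3 h4 h5 h6 <;>
    first
      | (simp [PySem.Dict.mem_keys_insert, or_comm]; done)
      | (exfalso; have h1' := not_dash_of_skip _ h1; simp_all)
      | (exfalso; simp_all)

-- keys of A's parsed dict = keys B streams off the lines
lemma keys_foldl (lines : List String) (d : PySem.Dict String String) (k : String) :
    k ∈ (lines.foldl pvValuesStep d).keys ↔
      k ∈ d.keys ∨ ∃ raw ∈ lines, k ∈ pvKeyOfLine raw := by
  induction lines generalizing d with
  | nil => simp
  | cons hd tl ih =>
      simp only [List.foldl_cons, List.mem_cons]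
      rw [ih, keys_step]
      constructor
      · rintro ((h | h) | ⟨raw, hraw, hk⟩)
        · exact Or.inl h
        · exact Or.inr ⟨hd, Or.inl rfl, h⟩
        · exact Or.inr ⟨raw, Or.inr hraw, hk⟩
      · rintro (h | ⟨raw, (rfl | hraw), hk⟩)
        · exact Or.inl (Or.inl h)
        · exact Or.inl (Or.inr hk)
        · exact Or.inr ⟨raw, hraw, hk⟩

-- membership in an add-if fold building a PySem.Set
lemma mem_fold_add_if {α : Type} (l : List α) (f : α → Bool) (g : α → String)
    (pres : PySem.Set String) (x : String) :
    (x ∈ l.foldl (fun p a => if f a then PySem.Set.add p (g a) else p) pres) ↔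
      x ∈ pres ∨ ∃ a ∈ l, f a = true ∧ g a = x := by
  induction l generalizing pres with
  | nil => simp
  | cons hd tl ih =>
      simp only [List.foldl_cons, List.mem_cons]
      by_cases h : f hd
      · simp [h, ih, PySem.Set.mem_add]
        tauto
      · simp [h, ih]

-- membership in the innermost add-if fold over the alias pairs
lemma mem_pairs_fold (key : String) (pres : PySem.Set String) (x : String) :
    (x ∈ pvAliasPairs.foldl (fun pres p =>
        if key == p.1 || PySem.Str.startswith key (p.1 ++ " ")
        then PySem.Set.add pres p.2 else pres) pres) ↔
      x ∈ pres ∨ ∃ p ∈ pvAliasPairs,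
        (key == p.1 || PySem.Str.startswith key (p.1 ++ " ")) = true ∧ p.2 = x :=
  mem_fold_add_if pvAliasPairs
    (fun p => key == p.1 || PySem.Str.startswith key (p.1 ++ " ")) Prod.snd pres x

-- membership in the fold over the keys of one line
lemma mem_key_fold (keys : List String) (pres : PySem.Set String) (x : String) :
    (x ∈ keys.foldl (fun pres key =>
        pvAliasPairs.foldl (fun pres p =>
          if key == p.1 || PySem.Str.startswith key (p.1 ++ " ")
          then PySem.Set.add pres p.2 else pres) pres) pres) ↔
      x ∈ pres ∨ ∃ key ∈ keys, ∃ p ∈ pvAliasPairs,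
        (key == p.1 || PySem.Str.startswith key (p.1 ++ " ")) = true ∧ p.2 = x := by
  induction keys generalizing pres with
  | nil => simp
  | cons k tl ih =>
      simp only [List.foldl_cons, List.mem_cons]
      rw [ih, mem_pairs_fold]
      constructor
      · rintro ((h | ⟨p, hp, hm, he⟩) | ⟨key, hk, hrest⟩)
        · exact Or.inl h
        · exact Or.inr ⟨k, Or.inl rfl, p, hp, hm, he⟩
        · exact Or.inr ⟨key, Or.inr hk, hrest⟩
      · rintro (h | ⟨key, (rfl | hk), hrest⟩)
        · exact Or.inl (Or.inl h)
        · exact Or.inl (Or.inr hrest)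
        · exact Or.inr ⟨key, hk, hrest⟩

-- membership in B's present-set
lemma mem_present (lines : List String) (pres : PySem.Set String) (x : String) :
    (x ∈ lines.foldl (fun pres raw_line =>
        (pvKeyOfLine raw_line).foldl (fun pres key =>
          pvAliasPairs.foldl (fun pres p =>
            if key == p.1 || PySem.Str.startswith key (p.1 ++ " ")
            then PySem.Set.add pres p.2 else pres) pres) pres) pres) ↔
      x ∈ pres ∨ ∃ raw ∈ lines, ∃ key ∈ pvKeyOfLine raw, ∃ p ∈ pvAliasPairs,
        (key == p.1 || PySem.Str.startswith key (p.1 ++ " ")) = true ∧ p.2 = x := by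
  induction lines generalizing pres with
  | nil => simp
  | cons raw tl ih =>
      simp only [List.foldl_cons, List.mem_cons]
      rw [ih, mem_key_fold]
      constructor
      · rintro ((h | ⟨key, hk, hrest⟩) | ⟨raw2, hraw, hrest⟩)
        · exact Or.inl h
        · exact Or.inr ⟨raw, Or.inl rfl, key, hk, hrest⟩
        · exact Or.inr ⟨raw2, Or.inr hraw, hrest⟩
      · rintro (h | ⟨raw2, (rfl | hraw), hrest⟩)
        · exact Or.inl (Or.inl h)
        · exact Or.inl (Or.inr hrest)
        · exact Or.inr ⟨raw2, hraw, hrest⟩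

-- for a field of A, the flat alias map carries exactly its aliases
lemma pairs_of_field (la : String × List String) (hla : la ∈ pvFields) (key : String) :
    (∃ p ∈ pvAliasPairs,
        (key == p.1 || PySem.Str.startswith key (p.1 ++ " ")) = true ∧ p.2 = la.1) ↔
      ∃ al ∈ la.2, (key == al || PySem.Str.startswith key (al ++ " ")) = true := by
  simp only [pvFields, List.mem_cons, List.not_mem_nil, or_false] at hla
  rcases hla with rfl | rfl | rfl | rfl | rfl | rfl | rfl <;> simp [pvAliasPairs]

-- ===== VERDICT (by name: the statement is the Claim_ definition above) =====
theorem user_profile_missing_basics_py_spec : Claim_equal_user_profile_missing_basics_py := by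
  intro text _
  unfold Spec_user_profile_missing_basics_py user_profile_missing_basics_py user_profile_missing_basics_py_alt
  rw [PySem.List.foldl_append_if, List.nil_append]
  have hlab : pvLabels = pvFields.map Prod.fst := by rfl
  rw [hlab, List.filter_map]
  congr 1
  apply List.filter_congr
  intro la hla
  simp only [Function.comp]
  congr 1
  rw [Bool.eq_iff_iff, List.any_eq_true, PySem.Set.contains_iff, mem_present]
  constructor
  · rintro ⟨key, hk, hm⟩
    refine Or.inr ?_
    unfold pvValues at hk
    rw [keys_foldl] at hk
    rcases hk with h0 | ⟨raw, hraw, hkey⟩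
    · simp [PySem.Dict.keys_empty] at h0
    · exact ⟨raw, hraw, key, hkey, (pairs_of_field la hla key).2 (List.any_eq_true.mp hm)⟩
  · rintro (h0 | ⟨raw, hraw, key, hkey, hp⟩)
    · simp [PySem.Set.empty] at h0
    · refine ⟨key, ?_, List.any_eq_true.mpr ((pairs_of_field la hla key).1 hp)⟩
      unfold pvValues
      rw [keys_foldl]
      exact Or.inr ⟨raw, hraw, hkey⟩
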